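-- pv_equiv track=rewrite | github.com/XohamOG/mumbaihacks | agents/knowledge/agent.py | create_learning_resources
-- ===== SOURCE A (Python) =====
-- def create_learning_resources(patterns):
--     """Create additional learning resources"""
--     resources = []
--
--     for pattern in patterns:
--         pattern_type = pattern.get("type")
--         if pattern_type == "statistical_manipulation":
--             resources.append({
--                 "title": "Understanding Statistical Manipulation",
--                 "type": "guide",
--                 "content": "Learn how statistics can be misleading and how to spot manipulation"
--             })
--         elif pattern_type == "emotional_manipulation":
--             resources.append({
--                 "title": "Recognizing Emotional Manipulation",
--                 "type": "guide",
--                 "content": "Understand how emotions are used to bypass critical thinking"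
--             })
--
--     return resources
-- ===== SOURCE B (Python) =====
-- _STAT = {
--     "title": "Understanding Statistical Manipulation",
--     "type": "guide",
--     "content": "Learn how statistics can be misleading and how to spot manipulation",
-- }
-- _EMO = {
--     "title": "Recognizing Emotional Manipulation",
--     "type": "guide",
--     "content": "Understand how emotions are used to bypass critical thinking",
-- }
--
--
-- def create_learning_resources(patterns):
--     """Create additional learning resources (divide and conquer over the pattern list)."""
--     if not patterns:
--         return []
--     if len(patterns) == 1:
--         t = patterns[0].get("type")
--         if t == "statistical_manipulation":
--             return [dict(_STAT)]
--         if t == "emotional_manipulation":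
--             return [dict(_EMO)]
--         return []
--     mid = len(patterns) // 2
--     return create_learning_resources(patterns[:mid]) + create_learning_resources(patterns[mid:])
-- ===== Notes on version B (the rewrite author's own statement) =====
-- stated objective: alternative
-- what changed: Replaced the single forward accumulator loop with a divide-and-conquer recursion: split the pattern list in half, recurse on each half, and concatenate the two resource lists (correct because per-pattern contributions concatenate associatively).
import Mathlib
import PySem

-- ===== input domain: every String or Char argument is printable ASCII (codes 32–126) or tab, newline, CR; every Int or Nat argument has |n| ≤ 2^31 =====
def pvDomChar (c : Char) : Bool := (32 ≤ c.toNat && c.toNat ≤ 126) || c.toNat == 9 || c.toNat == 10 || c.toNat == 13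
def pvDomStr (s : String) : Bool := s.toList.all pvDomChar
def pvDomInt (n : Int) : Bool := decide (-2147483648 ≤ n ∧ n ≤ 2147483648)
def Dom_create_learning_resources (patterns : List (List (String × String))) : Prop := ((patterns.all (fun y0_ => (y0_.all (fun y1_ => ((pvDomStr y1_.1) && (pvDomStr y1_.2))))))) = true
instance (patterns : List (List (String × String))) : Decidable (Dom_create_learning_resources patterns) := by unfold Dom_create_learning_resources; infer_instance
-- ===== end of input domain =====

-- B replaces A's single forward accumulator loop with divide-and-conquer recursion
-- (split the list in half, recurse, concatenate); objective: alternative, same result.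

-- ===== PORT A =====
def pvStatRes : List (String × String) :=
  [("title", "Understanding Statistical Manipulation"),
   ("type", "guide"),
   ("content", "Learn how statistics can be misleading and how to spot manipulation")]

def pvEmoRes : List (String × String) :=
  [("title", "Recognizing Emotional Manipulation"),
   ("type", "guide"),
   ("content", "Understand how emotions are used to bypass critical thinking")]

def create_learning_resources (patterns : List (List (String × String))) : List (List (String × String)) :=
  patterns.foldl (fun resources pattern =>
    let pattern_type := PySem.Dict.get? (PySem.Dict.mk pattern) "type"
    if pattern_type == some "statistical_manipulation" then
      resources ++ [pvStatRes]
    else if pattern_type == some "emotional_manipulation" then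
      resources ++ [pvEmoRes]
    else resources) []

-- ===== PORT B =====
-- patterns[:mid] / patterns[mid:] with 0 ≤ mid ≤ len are exactly List.take / List.drop
def create_learning_resources_alt : List (List (String × String)) → List (List (String × String))
  | [] => []
  | [p] =>
    match PySem.Dict.get? (PySem.Dict.mk p) "type" with
    | some "statistical_manipulation" => [pvStatRes]
    | some "emotional_manipulation" => [pvEmoRes]
    | _ => []
  | p :: q :: rest =>
    let ps := p :: q :: rest
    let mid := ps.length / 2
    create_learning_resources_alt (ps.take mid) ++ create_learning_resources_alt (ps.drop mid)
termination_by ps => ps.length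
decreasing_by
  · simp; omega
  · simp; omega

-- ===== PRECONDITION & SPEC =====
def Spec_create_learning_resources (patterns : List (List (String × String))) (out : List (List (String × String))) : Prop := out = create_learning_resources_alt patterns
instance (patterns : List (List (String × String))) (out : List (List (String × String))) : Decidable (Spec_create_learning_resources patterns out) := by unfold Spec_create_learning_resources; infer_instance

-- ===== CLAIM (what is proved, stated in full; the proofs are below) =====
def Claim_equal_create_learning_resources : Prop := ∀ (patterns : List (List (String × String))), Dom_create_learning_resources patterns → Spec_create_learning_resources patterns (create_learning_resources patterns)

-- ===== LEMMAS AND PROOFS =====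

-- the contribution of one pattern (proof-only characterisation)
def pvHit (p : List (String × String)) : Option (List (String × String)) :=
  match PySem.Dict.get? (PySem.Dict.mk p) "type" with
  | some "statistical_manipulation" => some pvStatRes
  | some "emotional_manipulation" => some pvEmoRes
  | _ => none

-- B equals the flat per-element contribution map (by B's own recursion scheme)
theorem pv_alt_eq_filterMap (ps : List (List (String × String))) :
    create_learning_resources_alt ps = ps.filterMap pvHit := by
  induction ps using create_learning_resources_alt.induct with
  | case1 => simp [create_learning_resources_alt]
  | case2 p h => simp [create_learning_resources_alt, pvHit, h]
  | case3 p h => simp [create_learning_resources_alt, pvHit, h]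
  | case4 p h1 h2 =>
    simp only [create_learning_resources_alt, pvHit, List.filterMap_cons, List.filterMap_nil]
  | case5 p q rest ps mid ih1 ih2 =>
    rw [create_learning_resources_alt, ih1, ih2, ← List.filterMap_append,
      List.take_append_drop]

-- A's foldl from any accumulator equals the accumulator ++ the contribution map
theorem pv_foldl_eq_filterMap (ps : List (List (String × String))) (acc : List (List (String × String))) :
    ps.foldl (fun resources pattern =>
      let pattern_type := PySem.Dict.get? (PySem.Dict.mk pattern) "type"
      if pattern_type == some "statistical_manipulation" then resources ++ [pvStatRes]
      else if pattern_type == some "emotional_manipulation" then resources ++ [pvEmoRes]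
      else resources) acc = acc ++ ps.filterMap pvHit := by
  induction ps generalizing acc with
  | nil => simp
  | cons p rest ih =>
    rw [List.foldl_cons, ih]
    cases h : PySem.Dict.get? (PySem.Dict.mk p) "type" with
    | none => simp [pvHit, h]
    | some t =>
      by_cases h1 : t = "statistical_manipulation"
      · subst h1; simp [pvHit, h]
      · by_cases h2 : t = "emotional_manipulation"
        · subst h2; simp [pvHit, h]
        · simp [pvHit, h, h1, h2]

-- ===== VERDICT (by name: the statement is the Claim_ definition above) =====
theorem create_learning_resources_spec : Claim_equal_create_learning_resources := by
  intro patterns _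
  unfold Spec_create_learning_resources create_learning_resources
  rw [pv_foldl_eq_filterMap, pv_alt_eq_filterMap]
  simp
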